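-- pv_equiv track=rewrite | github.com/tbright176/safebee-test | loop/rail_manager/views.py | get_url_tokens
-- ===== SOURCE A (Python) =====
-- def get_url_tokens(url):
--     """
--     Given a URL, returns a list of tokens from the URL split in a way
--     that is used in the Rail.url field. For example:
--
--     /test-category/test-basename.html becomes:
--     ['/test-category/test-basename.html', '/test-category/', '/']
--
--     The tokens are meant to be tested against Rails in the order returned,
--     as they go from more to less specificity.
--     """
--     tokens = []
--     length = len(url)
--     for i in range(len(url)):
--         if url[i] == '/':
--             tokens.append(url[:(i + 1)])
--         if i == (length - 1):
--             if not url in tokens: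
--                 tokens.append(url)
--
--     tokens.reverse()
--     return tokens
-- ===== SOURCE B (Python) =====
-- def get_url_tokens(url):
--     tokens = []
--     prefix = ''
--     for ch in url:
--         prefix += ch
--         if ch == '/':
--             tokens.append(prefix)
--     if url and not url.endswith('/'):
--         tokens.append(url)
--     tokens.reverse()
--     return tokens
-- ===== Notes on version B (the rewrite author's own statement) =====
-- stated objective: simpler
-- what changed: B makes one pass over the characters, accumulating a growing prefix that it appends to the token list at each slash, replacing A's index loop with a fresh slice per slash and A's last-index membership scan of the token list by a plain endswith test after the loop.
import Mathlib
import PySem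

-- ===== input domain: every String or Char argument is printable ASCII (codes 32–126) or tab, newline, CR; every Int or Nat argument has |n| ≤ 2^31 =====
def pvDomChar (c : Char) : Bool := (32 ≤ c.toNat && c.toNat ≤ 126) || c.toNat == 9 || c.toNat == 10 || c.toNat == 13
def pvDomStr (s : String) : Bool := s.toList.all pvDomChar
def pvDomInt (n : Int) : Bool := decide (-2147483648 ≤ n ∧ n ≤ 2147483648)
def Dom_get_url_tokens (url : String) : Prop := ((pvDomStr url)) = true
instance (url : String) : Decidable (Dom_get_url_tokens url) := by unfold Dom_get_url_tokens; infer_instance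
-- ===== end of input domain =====

-- B replaces A's index loop (a fresh slice per slash and a final membership scan of the token
-- list) by a single pass accumulating a growing prefix, with an endswith test after the loop: simpler.

-- ===== PORT A =====
def get_url_tokens (url : String) : List String :=
  (List.foldl
    (fun tokens i =>
      let tokens :=
        if PySem.Str.pyGet? url i = some '/' then
          tokens ++ [PySem.Str.slice url none (some (i + 1))]
        else tokens
      if i = PySem.Str.len url - 1 then
        if url ∉ tokens then tokens ++ [url] else tokens
      else tokens)
    [] (PySem.List.pyRange 0 (PySem.Str.len url))).reverse

-- ===== PORT B =====
def get_url_tokens_alt (url : String) : List String :=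
  (let st := List.foldl
      (fun (st : List String × List Char) ch =>
        (if ch = '/' then st.1 ++ [String.ofList (st.2 ++ [ch])] else st.1, st.2 ++ [ch]))
      ([], []) url.toList
   if url ≠ "" ∧ PySem.Str.endswith url "/" = false then st.1 ++ [url] else st.1).reverse

-- ===== PRECONDITION & SPEC =====
def Spec_get_url_tokens (url : String) (out : List String) : Prop := out = get_url_tokens_alt url
instance (url : String) (out : List String) : Decidable (Spec_get_url_tokens url out) := by unfold Spec_get_url_tokens; infer_instance

-- ===== CLAIM (what is proved, stated in full; the proofs are below) =====
def Claim_equal_get_url_tokens : Prop := ∀ (url : String), Dom_get_url_tokens url → Spec_get_url_tokens url (get_url_tokens url)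

-- ===== LEMMAS AND PROOFS =====

-- B's loop invariant: after consuming cs with accumulated prefix `pre` and tokens `tk`,
-- the pair is (tk ++ one token per '/' in cs, pre ++ cs).
lemma bfold_invariant (cs : List Char) : ∀ (pre : List Char) (tk : List String),
    List.foldl
      (fun (st : List String × List Char) ch =>
        (if ch = '/' then st.1 ++ [String.ofList (st.2 ++ [ch])] else st.1, st.2 ++ [ch]))
      (tk, pre) cs
    = (tk ++ ((List.range cs.length).filter (fun k => cs[k]? = some '/')).map
          (fun k => String.ofList (pre ++ cs.take (k + 1))), pre ++ cs) := by
  induction cs with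
  | nil => simp
  | cons c rest ih =>
    intro pre tk
    simp only [List.foldl_cons]
    rw [ih]
    by_cases hc : c = '/'
    · subst hc
      simp [List.range_succ_eq_map, List.filter_map, List.map_map, Function.comp_def,
            List.take_succ_cons, Nat.succ_eq_add_one]
      rfl
    · simp [hc, List.range_succ_eq_map, List.filter_map, List.map_map, Function.comp_def,
            List.take_succ_cons, Nat.succ_eq_add_one]
      rfl

-- A's slice url[:k+1] (k a Nat index) is the string of the first k+1 characters.
lemma slice_take (url : String) (k : Nat) :
    PySem.Str.slice url none (some ((k : Int) + 1)) = String.ofList (url.toList.take (k + 1)) := by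
  rw [PySem.Str.slice]
  rw [show ((k : Int) + 1) = ((k + 1 : Nat) : Int) by push_cast; ring]
  rw [PySem.Chars.slice_eq_listSlice, PySem.List.slice_to_natCast]

theorem get_url_tokens_spec : Claim_equal_get_url_tokens := by
  intro url _
  unfold Spec_get_url_tokens get_url_tokens get_url_tokens_alt
  cases hn : url.toList.length with
  | zero =>
    have h0 : url.toList = [] := List.length_eq_zero_iff.mp hn
    have h0' : url = "" := String.toList_eq_nil_iff.mp h0
    simp [PySem.Str.len, h0', PySem.List.pyRange_one_eq_nil]
  | succ m =>
    have hm : m < url.toList.length := by omega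
    have hlen : PySem.Str.len url = (m : Int) + 1 := by
      simp [PySem.Str.len, hn]
    simp only [hlen]
    have hsplit : PySem.List.pyRange 0 ((m : Int) + 1)
        = PySem.List.pyRange 0 (m : Int) ++ [(m : Int)] := by
      rw [PySem.List.pyRange_one_append 0 (m : Int) ((m : Int) + 1)
            (by exact_mod_cast Int.natCast_nonneg m) (by omega),
          PySem.List.pyRange_one_singleton]
    rw [hsplit, List.foldl_append, List.foldl_cons, List.foldl_nil]
    -- the loop body never reaches the last-index branch on the front range
    rw [PySem.List.foldl_congr_mem (PySem.List.pyRange 0 (m : Int)) _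
          (fun tokens i =>
            if PySem.Str.pyGet? url i = some '/' then
              tokens ++ [PySem.Str.slice url none (some (i + 1))]
            else tokens) []
          (by
            intro acc i hi
            obtain ⟨h0, hlt⟩ := PySem.List.mem_pyRange_one.mp hi
            have hne : ¬ (i = (m : Int)) := by omega
            simp [hne])]
    rw [PySem.List.foldl_append_ite
          (p := fun i => PySem.Str.pyGet? url i = some '/')
          (f := fun i => PySem.Str.slice url none (some (i + 1)))]
    simp only [PySem.List.pyRange_zero_natCast, List.filter_map, List.map_map,
      Function.comp_def, PySem.Str.pyGet?_natCast, slice_take, List.nil_append]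
    rw [bfold_invariant url.toList [] []]
    simp only [List.nil_append]
    by_cases hc : url.toList[m]? = some '/'
    · -- the URL ends with '/': A finds url already among the tokens, B's guard is off
      have htake : url.toList.take (m + 1) = url.toList :=
        List.take_of_length_le (by omega)
      have hofl : String.ofList (url.toList.take (m + 1)) = url := by
        rw [htake, String.ofList_toList]
      have hmem : ((m : Int) = (m : Int) + 1 - 1) := by ring
      have hgm : url.toList[m] = '/' := by
        simpa [List.getElem?_eq_getElem hm] using hc
      have hsuf : PySem.Str.endswith url "/" = true := by
        rw [PySem.Str.endswith]
        refine (PySem.Chars.endswith_iff _ _).mpr ⟨url.toList.take m, ?_⟩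
        calc url.toList.take m ++ "/".toList = url.toList.take m ++ [url.toList[m]] := by
              rw [hgm]; rfl
          _ = url.toList.take (m + 1) := List.take_append_getElem hm
          _ = url.toList := htake
      simp only [hc, if_true, ← hmem, hofl, hsuf]
      simp [hn, List.range_succ, List.filter_append, hofl, List.filter, hgm]
    · -- the URL does not end with '/': A appends url at the last index, so does B
      have hne : url ≠ "" := by
        intro h; rw [h] at hn; simp at hn
      have hend : PySem.Str.endswith url "/" = false := by
        rw [PySem.Str.endswith]
        rcases h : PySem.Chars.endswith url.toList "/".toList with _ | _
        · rfl
        · exfalso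
          obtain ⟨t, ht⟩ := (PySem.Chars.endswith_iff _ _).mp h
          have hlt : t.length = m := by
            have := congrArg List.length ht
            simp [hn] at this; omega
          apply hc
          rw [← ht, ← hlt]
          exact List.getElem?_concat_length
      have hnotmem : ∀ x, x < m → url.toList[x]? = some '/' →
          ¬ (String.ofList (url.toList.take (x + 1)) = url) := by
        intro x hx _ heq
        have := congrArg (fun s => s.toList.length) heq
        simp [String.toList_ofList, List.length_take, hn] at this
        omega
      have hmem : ((m : Int) = (m : Int) + 1 - 1) := by ring
      simp only [hc, if_false, ← hmem, hend]
      simp only [hn, List.range_succ, List.filter_append]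
      simp [hc, hne]
      exact hnotmem
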